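-- pv_equiv track=rewrite | github.com/huyquangdao/KECRS | dataset.py | _edge_list_1
-- ===== SOURCE A (Python) =====
-- from collections import defaultdict
--
-- def _edge_list_1(kg, n_entity, hop):
--     edge_list = []
--     for h in range(hop):
--         for entity in range(n_entity):
--             # add self loop
--             # edge_list.append((entity, entity))
--             # self_loop id = 185
--             edge_list.append((entity, entity, 13))
--             if entity not in kg:
--                 continue
--             for tail_and_relation in kg[entity]:
--                 if (
--                     entity != tail_and_relation[1] and tail_and_relation[0] != 13
--                 ):  # and tail_and_relation[0] in EDGE_TYPES:
--                     edge_list.append(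
--                         (entity, tail_and_relation[1], tail_and_relation[0])
--                     )
--                     edge_list.append(
--                         (tail_and_relation[1], entity, tail_and_relation[0])
--                     )
--
--     relation_cnt = defaultdict(int)
--     relation_idx = {}
--     for h, t, r in edge_list:
--         relation_cnt[r] += 1
--     for h, t, r in edge_list:
--         if relation_cnt[r] > 10 and r not in relation_idx:
--             relation_idx[r] = len(relation_idx)
--
--     return [
--         (h, t, relation_idx[r]) for h, t, r in edge_list if relation_cnt[r] > 100
--     ], relation_cnt
-- ===== SOURCE B (Python) =====
-- from collections import Counter
--
-- def _edge_list_1(kg, n_entity, hop):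
--     # One single-hop pass built with comprehensions, Counter for the tallies,
--     # index map from the first-occurrence relation order; replicate at the end.
--     if hop <= 0:
--         return [], {}
--     base = [e
--             for entity in range(n_entity)
--             for e in [(entity, entity, 13)] + [x
--                 for r, t in kg.get(entity, [])
--                 if t != entity and r != 13
--                 for x in [(entity, t, r), (t, entity, r)]]]
--     rels = [r for _, _, r in base]
--     cnt = Counter(rels)
--     idx = {r: i
--            for i, r in enumerate(r for r in dict.fromkeys(rels)
--                                  if cnt[r] * hop > 10)}
--     mapped = [(h, t, idx[r]) for h, t, r in base if cnt[r] * hop > 100]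
--     return mapped * hop, {r: c * hop for r, c in cnt.items()}
-- ===== Notes on version B (the rewrite author's own statement) =====
-- stated objective: faster
-- what changed: B builds the single-hop edge list once with comprehensions, tallies relations with a Counter, derives the relation-index map from the first-occurrence order of relations (dict.fromkeys + enumerate) instead of A's conditional-insert rescan, and replicates the mapped result hop times instead of rebuilding and rescanning the replicated list.
import Mathlib
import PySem

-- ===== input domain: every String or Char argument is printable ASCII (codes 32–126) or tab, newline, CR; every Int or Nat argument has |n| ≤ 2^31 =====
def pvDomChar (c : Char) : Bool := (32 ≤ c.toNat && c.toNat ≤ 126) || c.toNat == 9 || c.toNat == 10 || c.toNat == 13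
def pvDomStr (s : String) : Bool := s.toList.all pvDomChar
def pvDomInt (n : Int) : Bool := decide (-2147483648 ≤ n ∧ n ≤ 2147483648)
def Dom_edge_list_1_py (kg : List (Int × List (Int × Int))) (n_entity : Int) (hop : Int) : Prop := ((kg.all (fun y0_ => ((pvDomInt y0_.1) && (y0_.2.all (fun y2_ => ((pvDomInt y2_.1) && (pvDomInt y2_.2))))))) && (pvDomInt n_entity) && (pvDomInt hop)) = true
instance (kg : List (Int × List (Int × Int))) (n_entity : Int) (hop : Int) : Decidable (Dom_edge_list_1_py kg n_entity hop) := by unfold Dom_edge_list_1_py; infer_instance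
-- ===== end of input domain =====

-- B builds the single-hop edge list once with comprehensions, tallies relations with a
-- Counter, derives the index map from the first-occurrence relation order, and
-- replicates the mapped result, instead of rebuilding and rescanning the list hop times.

-- ===== PORT A =====
-- A-side helper: the edge_list accumulation loops of A ('for h in range(hop): for entity in range(n_entity): …')
def pvEdgeA (kg : List (Int × List (Int × Int))) (n_entity : Int) (hop : Int) : List (Int × Int × Int) :=
  (PySem.List.pyRange 0 hop 1).foldl (fun acc _h =>
    (PySem.List.pyRange 0 n_entity 1).foldl (fun acc entity =>
      let acc := acc ++ [(entity, entity, 13)]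
      match (PySem.Dict.mk kg).get? entity with
      | none => acc  -- 'if entity not in kg: continue'
      | some tails =>
        tails.foldl (fun acc tr =>
          if entity ≠ tr.2 ∧ tr.1 ≠ 13 then
            acc ++ [(entity, tr.2, tr.1), (tr.2, entity, tr.1)]
          else acc) acc) acc) []

def edge_list_1_py (kg : List (Int × List (Int × Int))) (n_entity : Int) (hop : Int) :
    (List (Int × Int × Int)) × (List (Int × Int)) :=
  let edge_list := pvEdgeA kg n_entity hop
  let relation_cnt : PySem.Dict Int Int :=
    edge_list.foldl (fun d p => d.modify p.2.2 0 (· + 1)) PySem.Dict.empty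
  -- every r looked up below occurs in edge_list, so the defaultdict reads never insert
  -- and 'relation_idx[r]' (guarded by cnt > 100 → r ∈ relation_idx) never raises: getD is exact here
  let relation_idx : PySem.Dict Int Int :=
    edge_list.foldl (fun d p =>
      if 10 < relation_cnt.getD p.2.2 0 ∧ d.contains p.2.2 = false then
        d.insert p.2.2 (d.size : Int)
      else d) PySem.Dict.empty
  ((edge_list.filter (fun p => decide (100 < relation_cnt.getD p.2.2 0))).map
      (fun p => (p.1, p.2.1, relation_idx.getD p.2.2 0)),
   relation_cnt.items)

-- ===== PORT B =====
def edge_list_1_py_alt (kg : List (Int × List (Int × Int))) (n_entity : Int) (hop : Int) :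
    (List (Int × Int × Int)) × (List (Int × Int)) :=
  if hop ≤ 0 then ([], [])
  else
    let base := (PySem.List.pyRange 0 n_entity 1).flatMap (fun entity =>
      (entity, entity, 13) :: ((PySem.Dict.mk kg).getD entity []).flatMap (fun rt =>
        if rt.2 ≠ entity ∧ rt.1 ≠ 13 then [(entity, rt.2, rt.1), (rt.2, entity, rt.1)] else []))
    let rels := base.map (fun p => p.2.2)
    let cnt : PySem.Dict Int Int := PySem.Dict.counter rels
    -- 'idx[r]' below is guarded by cnt[r]*hop > 100 → r ∈ idx, so getD is exact
    let idx : PySem.Dict Int Int := PySem.Dict.mk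
      ((PySem.List.enumerate ((PySem.List.dedup rels).filter
          (fun r => decide (10 < cnt.getD r 0 * hop)))).map (fun p => (p.2, p.1)))
    let mapped := (base.filter (fun p => decide (100 < cnt.getD p.2.2 0 * hop))).map
        (fun p => (p.1, p.2.1, idx.getD p.2.2 0))
    (PySem.List.pyRepeat mapped hop, cnt.items.map (fun q => (q.1, q.2 * hop)))

-- ===== PRECONDITION & SPEC =====
def Spec_edge_list_1_py (kg : List (Int × List (Int × Int))) (n_entity : Int) (hop : Int) (out : (List (Int × Int × Int)) × (List (Int × Int))) : Prop := out = edge_list_1_py_alt kg n_entity hop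
instance (kg : List (Int × List (Int × Int))) (n_entity : Int) (hop : Int) (out : (List (Int × Int × Int)) × (List (Int × Int))) : Decidable (Spec_edge_list_1_py kg n_entity hop out) := by unfold Spec_edge_list_1_py; infer_instance

-- ===== CLAIM (what is proved, stated in full; the proofs are below) =====
def Claim_equal_edge_list_1_py : Prop := ∀ (kg : List (Int × List (Int × Int))) (n_entity : Int) (hop : Int), Dom_edge_list_1_py kg n_entity hop → Spec_edge_list_1_py kg n_entity hop (edge_list_1_py kg n_entity hop)

-- ===== LEMMAS AND PROOFS =====

-- B's per-entity chunk (the inner comprehension of Source B), as a named function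
def pvChunk (kg : List (Int × List (Int × Int))) (entity : Int) : List (Int × Int × Int) :=
  (entity, entity, 13) :: ((PySem.Dict.mk kg).getD entity []).flatMap (fun rt =>
    if rt.2 ≠ entity ∧ rt.1 ≠ 13 then [(entity, rt.2, rt.1), (rt.2, entity, rt.1)] else [])

def pvBase (kg : List (Int × List (Int × Int))) (n : Int) : List (Int × Int × Int) :=
  (PySem.List.pyRange 0 n 1).flatMap (pvChunk kg)

theorem pv_inner (entity : Int) (tails : List (Int × Int)) (acc : List (Int × Int × Int)) :
    tails.foldl (fun acc tr =>
      if entity ≠ tr.2 ∧ tr.1 ≠ 13 then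
        acc ++ [(entity, tr.2, tr.1), (tr.2, entity, tr.1)]
      else acc) acc
    = acc ++ tails.flatMap (fun rt =>
        if rt.2 ≠ entity ∧ rt.1 ≠ 13 then [(entity, rt.2, rt.1), (rt.2, entity, rt.1)] else []) := by
  have h : (fun (acc : List (Int × Int × Int)) (tr : Int × Int) =>
      if entity ≠ tr.2 ∧ tr.1 ≠ 13 then
        acc ++ [(entity, tr.2, tr.1), (tr.2, entity, tr.1)]
      else acc) = fun acc tr => acc ++
        (if tr.2 ≠ entity ∧ tr.1 ≠ 13 then [(entity, tr.2, tr.1), (tr.2, entity, tr.1)] else []) := by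
    funext a tr
    by_cases h1 : entity = tr.2 <;> by_cases h2 : tr.1 = 13 <;> simp [h1, h2, Ne, eq_comm]
  rw [h, PySem.List.foldl_append_eq_flatMap]

theorem pv_innerfull (kg : List (Int × List (Int × Int))) (n : Int)
    (acc : List (Int × Int × Int)) :
    (PySem.List.pyRange 0 n 1).foldl (fun acc entity =>
      let acc := acc ++ [(entity, entity, 13)]
      match (PySem.Dict.mk kg).get? entity with
      | none => acc
      | some tails =>
        tails.foldl (fun acc tr =>
          if entity ≠ tr.2 ∧ tr.1 ≠ 13 then
            acc ++ [(entity, tr.2, tr.1), (tr.2, entity, tr.1)]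
          else acc) acc) acc
    = acc ++ pvBase kg n := by
  have h : (fun (acc : List (Int × Int × Int)) (entity : Int) =>
      let acc := acc ++ [(entity, entity, 13)]
      match (PySem.Dict.mk kg).get? entity with
      | none => acc
      | some tails =>
        tails.foldl (fun acc tr =>
          if entity ≠ tr.2 ∧ tr.1 ≠ 13 then
            acc ++ [(entity, tr.2, tr.1), (tr.2, entity, tr.1)]
          else acc) acc)
      = fun acc entity => acc ++ pvChunk kg entity := by
    funext acc entity
    show (match (PySem.Dict.mk kg).get? entity with
      | none => acc ++ [(entity, entity, 13)]
      | some tails =>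
        tails.foldl (fun acc tr =>
          if entity ≠ tr.2 ∧ tr.1 ≠ 13 then
            acc ++ [(entity, tr.2, tr.1), (tr.2, entity, tr.1)]
          else acc) (acc ++ [(entity, entity, 13)])) = acc ++ pvChunk kg entity
    cases hget : (PySem.Dict.mk kg).get? entity with
    | none =>
      simp [pvChunk, PySem.Dict.getD_eq_get?_getD, hget]
    | some tails =>
      simp only [pv_inner, pvChunk, PySem.Dict.getD_eq_get?_getD, hget, Option.getD_some]
      simp
  rw [h, PySem.List.foldl_append_eq_flatMap]
  rfl

theorem pv_edgeA_eq (kg : List (Int × List (Int × Int))) (n hop : Int) :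
    pvEdgeA kg n hop = (List.replicate hop.toNat (pvBase kg n)).flatten := by
  unfold pvEdgeA
  have h : (fun (acc : List (Int × Int × Int)) (_h : Int) =>
      (PySem.List.pyRange 0 n 1).foldl (fun acc entity =>
        let acc := acc ++ [(entity, entity, 13)]
        match (PySem.Dict.mk kg).get? entity with
        | none => acc
        | some tails =>
          tails.foldl (fun acc tr =>
            if entity ≠ tr.2 ∧ tr.1 ≠ 13 then
              acc ++ [(entity, tr.2, tr.1), (tr.2, entity, tr.1)]
            else acc) acc) acc)
      = fun acc _h => acc ++ pvBase kg n := by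
    funext acc e
    exact pv_innerfull kg n acc
  rw [h, PySem.List.foldl_append_eq_flatMap]
  rw [List.flatMap_def, List.map_const']
  simp [PySem.List.length_pyRange_one]

theorem pv_count_flatten {α : Type} [DecidableEq α] (k : Nat) (rs : List α) (r : α) :
    (List.flatten (List.replicate k rs)).count r = k * rs.count r := by
  induction k with
  | zero => simp
  | succ k ih => simp [List.replicate_succ, List.count_append, ih, Nat.succ_mul]; ring

theorem pv_set_flatten {α : Type} [BEq α] [LawfulBEq α] (k : Nat) (rs : List α) (hk : k ≠ 0) :
    PySem.Set.ofList (List.flatten (List.replicate k rs)) = PySem.Set.ofList rs := by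
  induction k with
  | zero => omega
  | succ k ih =>
    rcases Nat.eq_zero_or_pos k with h0 | hpos
    · subst h0; simp
    · rw [List.replicate_succ, List.flatten_cons, PySem.Set.ofList_append]
      have hmem : ∀ x ∈ List.flatten (List.replicate k rs), x ∈ rs := by
        intro x hx
        rcases List.mem_flatten.mp hx with ⟨l, hl, hxl⟩
        rwa [List.eq_of_mem_replicate hl] at hxl
      rw [PySem.Set.update_eq_append_filter]
      have : List.filter (fun y => !(PySem.Set.ofList rs).contains y)
          (PySem.Set.ofList (List.flatten (List.replicate k rs))) = [] := by
        apply List.filter_eq_nil_iff.mpr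
        intro a ha
        have : a ∈ rs := hmem a ((PySem.Set.mem_ofList _ _).mp ha)
        simp [PySem.Set.mem_ofList, this]
      rw [this, List.append_nil]

theorem pv_fm_flatten {T S : Type} (k : Nat) (xs : List T) (q : T → Bool) (m : T → S) :
    ((List.flatten (List.replicate k xs)).filter q).map m
    = List.flatten (List.replicate k ((xs.filter q).map m)) := by
  induction k with
  | zero => simp
  | succ k ih => simp [List.replicate_succ, List.filter_append, List.map_append]

-- the index map A builds, as a closed form: relations of s satisfying C, enumerated in order
def pvIdxD (C : Int → Prop) [DecidablePred C] (s : List Int) : PySem.Dict Int Int :=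
  PySem.Dict.mk ((PySem.List.enumerate (s.filter (fun r => decide (C r)))).map (fun p => (p.2, p.1)))

theorem pv_idxD_keys (C : Int → Prop) [DecidablePred C] (s : List Int) :
    (pvIdxD C s).keys = s.filter (fun r => decide (C r)) := by
  unfold pvIdxD
  rw [PySem.Dict.keys_mk, List.map_map]
  exact PySem.List.map_snd_enumerate _ 0

theorem pv_idxD_contains (C : Int → Prop) [DecidablePred C] (s : List Int) (r : Int) :
    (pvIdxD C s).contains r = true ↔ (C r ∧ r ∈ s) := by
  rw [PySem.Dict.contains_iff_mem_keys, pv_idxD_keys, List.mem_filter]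
  simp [and_comm]

theorem pv_idxD_step (C : Int → Prop) [DecidablePred C] (s : List Int) (r : Int) :
    (if C r ∧ (pvIdxD C s).contains r = false then
        (pvIdxD C s).insert r ((pvIdxD C s).size : Int)
      else pvIdxD C s) = pvIdxD C (PySem.Set.add s r) := by
  by_cases hr : r ∈ s
  · rw [PySem.Set.add_of_mem hr, if_neg]
    rintro ⟨h1, h2⟩
    rw [(pv_idxD_contains C s r).mpr ⟨h1, hr⟩] at h2
    simp at h2
  · rw [PySem.Set.add_of_not_mem hr]
    by_cases hC : C r
    · have hcf : (pvIdxD C s).contains r = false := by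
        rcases Bool.eq_false_or_eq_true ((pvIdxD C s).contains r) with h | h
        · exact absurd ((pv_idxD_contains C s r).mp h).2 hr
        · exact h
      rw [if_pos ⟨hC, hcf⟩]
      apply PySem.Dict.ext
      rw [PySem.Dict.items_insert_of_not_contains _ _ hcf]
      show _ = (pvIdxD C (s ++ [r])).items
      unfold pvIdxD
      rw [List.filter_append]
      have hfr : List.filter (fun r => decide (C r)) [r] = [r] := by simp [hC]
      rw [hfr, PySem.List.enumerate_append, List.map_append]
      have he1 : PySem.List.enumerate [r] (0 + ((s.filter (fun r => decide (C r))).length : Int))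
          = [(((s.filter (fun r => decide (C r))).length : Int), r)] := by
        rw [PySem.List.enumerate_cons, PySem.List.enumerate_nil]
        simp
      rw [he1]
      have hsz : ((pvIdxD C s).size : Int) = ((s.filter (fun r => decide (C r))).length : Int) := by
        have : (pvIdxD C s).size = (pvIdxD C s).keys.length := by
          simp [PySem.Dict.size, PySem.Dict.keys]
        rw [this, pv_idxD_keys]
      show (pvIdxD C s).items ++ [(r, ((pvIdxD C s).size : Int))] = _
      rw [hsz]
      rfl
    · rw [if_neg (fun h => hC h.1)]
      unfold pvIdxD
      rw [List.filter_append]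
      have : List.filter (fun r => decide (C r)) [r] = [] := by simp [hC]
      rw [this, List.append_nil]

theorem pv_idx_foldl (C : Int → Prop) [DecidablePred C] (l : List Int) :
    ∀ (s : List Int),
      l.foldl (fun d r =>
        if C r ∧ d.contains r = false then d.insert r (d.size : Int) else d) (pvIdxD C s)
      = pvIdxD C (PySem.Set.update s l) := by
  induction l with
  | nil => intro s; rw [PySem.Set.update_nil]; rfl
  | cons r l ih =>
    intro s
    rw [List.foldl_cons, PySem.Set.update_cons, ← ih (PySem.Set.add s r), pv_idxD_step]

-- A's index loop over any list computes exactly B's enumerated dictionary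
theorem pv_idx_closed (C : Int → Prop) [DecidablePred C] (l : List Int) :
    l.foldl (fun d r =>
      if C r ∧ d.contains r = false then d.insert r (d.size : Int) else d) PySem.Dict.empty
    = pvIdxD C (PySem.List.dedup l) := by
  have h0 : (PySem.Dict.empty : PySem.Dict Int Int) = pvIdxD C [] := rfl
  rw [h0, pv_idx_foldl, PySem.Set.update_nil_left]
  simp

-- two passes of A's index loop over the same list add nothing new on the second pass
theorem pv_idx_repl (C : Int → Prop) [DecidablePred C] (k : Nat) (l : List Int) (hk : k ≠ 0) :
    ((List.replicate k l).flatten).foldl (fun d r =>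
      if C r ∧ d.contains r = false then d.insert r (d.size : Int) else d) PySem.Dict.empty
    = l.foldl (fun d r =>
      if C r ∧ d.contains r = false then d.insert r (d.size : Int) else d) PySem.Dict.empty := by
  obtain ⟨k', rfl⟩ := Nat.exists_eq_succ_of_ne_zero hk
  rw [List.replicate_succ, List.flatten_cons, List.foldl_append, pv_idx_closed, pv_idx_foldl]
  congr 1
  have hmem : ∀ x ∈ (List.replicate k' l).flatten, x ∈ PySem.List.dedup l := by
    intro x hx
    rcases List.mem_flatten.mp hx with ⟨m, hm, hxm⟩
    rw [List.eq_of_mem_replicate hm] at hxm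
    simpa [PySem.List.mem_dedup] using hxm
  rw [PySem.Set.update_eq_append_filter]
  have hnil : List.filter (fun y => !(PySem.Set.ofList l).contains y)
      (PySem.Set.ofList ((List.replicate k' l).flatten)) = [] := by
    apply List.filter_eq_nil_iff.mpr
    intro a ha
    have h1 : a ∈ l := by
      have h2 := hmem a ((PySem.Set.mem_ofList _ _).mp ha)
      simpa [PySem.List.mem_dedup] using h2
    simp [PySem.Set.mem_ofList, h1]
  simp only [PySem.List.dedup_eq_ofList, hnil, List.append_nil]

theorem main_eq (kg : List (Int × List (Int × Int))) (n hop : Int) :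
    edge_list_1_py kg n hop = edge_list_1_py_alt kg n hop := by
  by_cases hk : hop ≤ 0
  · have he : pvEdgeA kg n hop = [] := by
      rw [pv_edgeA_eq]
      have h0 : hop.toNat = 0 := Int.toNat_of_nonpos hk
      rw [h0]; simp
    simp [edge_list_1_py, edge_list_1_py_alt, he, hk, PySem.Dict.empty]
  · rw [not_le] at hk
    have hk0 : hop.toNat ≠ 0 := by omega
    have hcast : (hop.toNat : Int) = hop := Int.toNat_of_nonneg (le_of_lt hk)
    have hE : pvEdgeA kg n hop = (List.replicate hop.toNat (pvBase kg n)).flatten :=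
      pv_edgeA_eq kg n hop
    set base := pvBase kg n with hbase
    set rsB := base.map (fun p => p.2.2) with hrsB
    have hrsA : (List.replicate hop.toNat base).flatten.map (fun p => p.2.2)
        = (List.replicate hop.toNat rsB).flatten := by
      rw [List.map_flatten, List.map_replicate]
    have hcntA : (List.replicate hop.toNat base).flatten.foldl
        (fun d p => d.modify p.2.2 0 (· + 1)) PySem.Dict.empty
        = PySem.Dict.counter ((List.replicate hop.toNat rsB).flatten) := by
      rw [PySem.Dict.counter_eq_foldl, ← hrsA, List.foldl_map]
    have hgetD : ∀ r, (PySem.Dict.counter ((List.replicate hop.toNat rsB).flatten)).getD r 0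
        = (PySem.Dict.counter rsB).getD r 0 * hop := by
      intro r
      rw [PySem.Dict.getD_counter, PySem.Dict.getD_counter, pv_count_flatten]
      push_cast
      rw [hcast, mul_comm]
    have hitems : (PySem.Dict.counter ((List.replicate hop.toNat rsB).flatten)).items
        = (PySem.Dict.counter rsB).items.map (fun q => (q.1, q.2 * hop)) := by
      rw [PySem.Dict.items_counter, PySem.Dict.items_counter, pv_set_flatten _ _ hk0,
        List.map_map]
      congr 1
      funext r
      simp only [Function.comp_apply]
      rw [pv_count_flatten]
      push_cast
      rw [hcast, mul_comm]
    simp only [edge_list_1_py, edge_list_1_py_alt]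
    rw [if_neg (not_le.mpr hk)]
    rw [hE]
    rw [hcntA]
    simp only [hgetD]
    have hidx : (List.replicate hop.toNat base).flatten.foldl (fun d p =>
        if 10 < (PySem.Dict.counter rsB).getD p.2.2 0 * hop ∧ d.contains p.2.2 = false then
          d.insert p.2.2 (d.size : Int)
        else d) PySem.Dict.empty
        = pvIdxD (fun r => 10 < (PySem.Dict.counter rsB).getD r 0 * hop)
            (PySem.List.dedup rsB) := by
      have hfold : ∀ (L : List (Int × Int × Int)),
          L.foldl (fun d p =>
            if 10 < (PySem.Dict.counter rsB).getD p.2.2 0 * hop ∧ d.contains p.2.2 = false then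
              d.insert p.2.2 (d.size : Int) else d) PySem.Dict.empty
          = (L.map (fun p => p.2.2)).foldl (fun d r =>
            if 10 < (PySem.Dict.counter rsB).getD r 0 * hop ∧ d.contains r = false then
              d.insert r (d.size : Int) else d) PySem.Dict.empty := by
        intro L
        rw [List.foldl_map]
      rw [hfold, hrsA,
        pv_idx_repl (fun r => 10 < (PySem.Dict.counter rsB).getD r 0 * hop) hop.toNat rsB hk0,
        pv_idx_closed]
    rw [hidx, pv_fm_flatten, hitems]
    have hchunk : pvChunk kg = fun entity =>
        (entity, entity, 13) :: ((PySem.Dict.mk kg).getD entity []).flatMap (fun rt =>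
          if rt.2 ≠ entity ∧ rt.1 ≠ 13 then [(entity, rt.2, rt.1), (rt.2, entity, rt.1)] else []) := rfl
    simp [PySem.List.pyRepeat, pvIdxD, pvBase, hchunk, hbase, hrsB]

-- ===== VERDICT (by name: the statement is the Claim_ definition above) =====
theorem edge_list_1_py_spec : Claim_equal_edge_list_1_py := by
  intro kg n_entity hop _dom
  unfold Spec_edge_list_1_py
  exact main_eq kg n_entity hop
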